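-- pv_equiv track=rewrite | github.com/lyndIssus/Codewars | whoLikesIt.py | likes
-- ===== SOURCE A (Python) =====
-- def likes(names):
--     result = ""
--     if(len(names) == 0):
--         return("no one likes this")
--     elif(len(names) == 1):
--         return(names[0] + " likes this")
--     elif(len(names)<4):
--         result+=names[0]
--         for i in range(1, len(names)-1):
--             result+=", "
--             result+=names[i]
--         result+= " and "
--         result+= names[len(names)-1]
--         result+= " like this"
--         return result
--     else:
--         return(names[0] + ", " + names[1] + " and " + str(len(names)-2) + " others like this")
-- ===== SOURCE B (Python) =====
-- def likes(names):
--     n = len(names)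
--     templates = ["no one likes this",
--                  "{} likes this",
--                  "{} and {} like this",
--                  "{}, {} and {} like this",
--                  "{}, {} and {} others like this"]
--     i = min(n, 4)
--     args = names[:i] if i < 4 else [names[0], names[1], str(n - 2)]
--     return templates[i].format(*args)
-- ===== Notes on version B (the rewrite author's own statement) =====
-- stated objective: idiomatic
-- what changed: Replaces the if/elif cascade with its explicit accumulation loop by an indexed table of five format templates selected with min(len(names), 4) and a single str.format call.
import Mathlib
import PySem

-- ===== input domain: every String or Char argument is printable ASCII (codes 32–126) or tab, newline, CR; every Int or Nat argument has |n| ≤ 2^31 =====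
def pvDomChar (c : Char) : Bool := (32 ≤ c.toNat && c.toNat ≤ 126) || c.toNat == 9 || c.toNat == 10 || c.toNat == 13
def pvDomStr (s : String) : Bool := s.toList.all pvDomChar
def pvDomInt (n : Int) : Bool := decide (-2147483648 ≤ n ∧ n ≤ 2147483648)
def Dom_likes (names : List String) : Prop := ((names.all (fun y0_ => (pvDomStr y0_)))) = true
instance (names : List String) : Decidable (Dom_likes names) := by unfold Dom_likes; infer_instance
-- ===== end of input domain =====

-- B is the same task written as an indexed table of five format templates and one format call (idiomatic).
-- Equivalence of RETURN values; neither program mutates its argument.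

-- ===== PORT A =====
-- literal transliteration of A: if/elif cascade, middle case accumulates 'result' with a
-- range(1, len-1) loop; strings are built on List Char (Lean's String.append is kernel-opaque).
def likes (names : List String) : String :=
  let n : Int := (names.length : Int)
  if n == 0 then "no one likes this"
  else if n == 1 then
    String.ofList ((PySem.List.pyGetD names 0 "").toList ++ (" likes this").toList)
  else if n < 4 then
    let result := (PySem.List.pyGetD names 0 "").toList
    let result := (PySem.List.pyRange 1 (n - 1) 1).foldl
      (fun acc i => (acc ++ (", ").toList) ++ (PySem.List.pyGetD names i "").toList) result
    let result := result ++ (" and ").toList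
    let result := result ++ (PySem.List.pyGetD names (n - 1) "").toList
    let result := result ++ (" like this").toList
    String.ofList result
  else
    String.ofList ((PySem.List.pyGetD names 0 "").toList ++ (", ").toList
      ++ (PySem.List.pyGetD names 1 "").toList ++ (" and ").toList
      ++ (PySem.Int.toChars (n - 2)) ++ (" others like this").toList)

-- ===== PORT B =====
-- str.format: replace each '{}' in the template by the next argument (exact for these
-- brace-free-argument templates; no other format syntax occurs).
def fmtChars : List Char → List String → List Char
  | [], _ => []
  | '{' :: '}' :: rest, a :: args => a.toList ++ fmtChars rest args
  | c :: rest, args => c :: fmtChars rest args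

def likes_alt (names : List String) : String :=
  let n : Int := (names.length : Int)
  let templates : List String :=
    ["no one likes this", "{} likes this", "{} and {} like this",
     "{}, {} and {} like this", "{}, {} and {} others like this"]
  let i : Int := min n 4
  let args : List String :=
    if i < 4 then PySem.List.slice names none (some i)
    else [PySem.List.pyGetD names 0 "", PySem.List.pyGetD names 1 "", PySem.Int.toStr (n - 2)]
  String.ofList (fmtChars (PySem.List.pyGetD templates i "").toList args)

-- ===== PRECONDITION & SPEC =====
def Spec_likes (names : List String) (out : String) : Prop := out = likes_alt names
instance (names : List String) (out : String) : Decidable (Spec_likes names out) := by unfold Spec_likes; infer_instance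

-- ===== CLAIM (what is proved, stated in full; the proofs are below) =====
def Claim_equal_likes : Prop := ∀ (names : List String), Dom_likes names → Spec_likes names (likes names)

-- ===== LEMMAS AND PROOFS =====

-- ===== VERDICT (by name: the statement is the Claim_ definition above) =====
theorem likes_spec : Claim_equal_likes := by
  intro names _
  unfold Spec_likes
  match names with
  | [] => rfl
  | [a] =>
    simp [likes, likes_alt, fmtChars, PySem.List.pyGetD,
      PySem.List.slice_to]
  | [a, b] =>
    simp [likes, likes_alt, fmtChars, PySem.List.pyGetD,
      PySem.List.pyRange, PySem.List.slice]
  | [a, b, c] =>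
    simp [likes, likes_alt, fmtChars, PySem.List.pyGetD,
      PySem.List.pyRange, PySem.List.slice]
  | a :: b :: c :: d :: rest =>
    have hmin : min ((rest.length : Int) + 1 + 1 + 1 + 1) 4 = 4 := by omega
    simp [likes, likes_alt, fmtChars, PySem.List.pyGetD, hmin,
      PySem.Int.toList_toStr,
      show ¬((rest.length : Int) + 1 + 1 + 1 + 1 < 4) from by omega,
      show ¬((rest.length : Int) + 1 + 1 + 1 + 1 = 0) from by omega,
      show ¬((rest.length : Int) + 1 + 1 + 1 = 0) from by omega]
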